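-- pv_equiv track=rewrite | github.com/AlexTuisov/HW2 | HW2_submission/24_submission/ex2.py | initiate_dict
-- ===== SOURCE A (Python) =====
-- def initiate_dict(medics, police, obs_num, obs_rows, obs_cols):
--     dict = {}
--     index = 1
--
--     if police == 0 and medics == 0:
--         for i in range(obs_rows):
--             for j in range(obs_cols):
--                 for t in range(obs_num):
--                     dict[((i,j), t, 'H')] = index
--                     dict[((i, j), t, 'S')] = index+1
--                     dict[((i, j), t, 'U')] = index+2
--                     index += 3
--     elif medics == 0:
--         for i in range(obs_rows):
--             for j in range(obs_cols):
--                 for t in range(obs_num):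
--                     dict[((i,j), t, 'H')] = index
--                     dict[((i, j), t, 'S')] = index+1
--                     dict[((i, j), t, 'U')] = index+2
--                     dict[((i, j), t, 'Q')] = index+3
--                     index += 4
--     elif police == 0:
--         for i in range(obs_rows):
--             for j in range(obs_cols):
--                 for t in range(obs_num):
--                     dict[((i,j), t, 'H')] = index
--                     dict[((i, j), t, 'S')] = index+1
--                     dict[((i, j), t, 'U')] = index+2
--                     dict[((i, j), t, 'I')] = index+3
--                     index += 4
--     else:
--         for i in range(obs_rows):
--             for j in range(obs_cols):
--                 for t in range(obs_num):
--                     dict[((i,j), t, 'H')] = index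
--                     dict[((i, j), t, 'S')] = index+1
--                     dict[((i, j), t, 'U')] = index+2
--                     dict[((i, j), t, 'I')] = index+3
--                     dict[((i, j), t, 'Q')] = index+4
--                     index += 5
--     return dict
-- ===== SOURCE B (Python) =====
-- def initiate_dict(medics, police, obs_num, obs_rows, obs_cols):
--     # Closed-form indexing: one flat loop over all slots; each flat index n is
--     # decoded by divmod into (i, j, t, state); no running counter, no flag branches.
--     states = ['H', 'S', 'U'] + (['I'] if medics != 0 else []) + (['Q'] if police != 0 else [])
--     if obs_rows <= 0 or obs_cols <= 0 or obs_num <= 0: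
--         return {}
--     S = len(states)
--     d = {}
--     for n in range(obs_rows * obs_cols * obs_num * S):
--         rest, k = divmod(n, S)
--         rest, t = divmod(rest, obs_num)
--         i, j = divmod(rest, obs_cols)
--         d[((i, j), t, states[k])] = n + 1
--     return d
-- ===== Notes on version B (the rewrite author's own statement) =====
-- stated objective: alternative
-- what changed: Replaces A's four branch-specific nested loops with a running counter by a single flat loop over range(rows*cols*num*len(states)) that decodes each flat index via divmod into (i, j, t, state) and assigns the closed-form index n+1.
import Mathlib
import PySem

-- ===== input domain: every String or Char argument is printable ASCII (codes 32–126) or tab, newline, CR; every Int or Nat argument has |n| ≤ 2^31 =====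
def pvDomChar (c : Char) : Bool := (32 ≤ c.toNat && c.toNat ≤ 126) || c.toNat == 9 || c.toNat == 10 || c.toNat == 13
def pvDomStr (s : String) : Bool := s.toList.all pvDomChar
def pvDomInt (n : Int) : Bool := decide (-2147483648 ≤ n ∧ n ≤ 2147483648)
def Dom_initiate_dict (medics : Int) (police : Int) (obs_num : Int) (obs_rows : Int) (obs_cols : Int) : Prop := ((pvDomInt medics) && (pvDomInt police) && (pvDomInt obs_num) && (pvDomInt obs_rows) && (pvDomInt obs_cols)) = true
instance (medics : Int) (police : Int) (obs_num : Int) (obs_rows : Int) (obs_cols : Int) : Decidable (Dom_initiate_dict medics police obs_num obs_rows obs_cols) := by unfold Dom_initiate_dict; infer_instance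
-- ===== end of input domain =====

-- B replaces A's four branch-specific nested loops with a running counter by one flat loop over
-- range(rows*cols*num*S) that divmod-decodes each flat index and uses the closed-form value n+1
-- (objective: alternative). Return values proved equal on all inputs.

-- Python dict assignment d[k] = v on an association list flattened to quadruples
-- (overwrite first matching key in place, else append): exact dict semantics.
def pvDIns (d : List ((Int × Int) × Int × String × Int)) (k : (Int × Int) × Int × String) (v : Int) :
    List ((Int × Int) × Int × String × Int) :=
  match d with
  | [] => [(k.1, k.2.1, k.2.2, v)]
  | e :: rest => if (e.1, e.2.1, e.2.2.1) = k then (k.1, k.2.1, k.2.2, v) :: rest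
                 else e :: pvDIns rest k v

-- ===== PORT A =====
def initiate_dict (medics : Int) (police : Int) (obs_num : Int) (obs_rows : Int) (obs_cols : Int) : List ((Int × Int) × Int × String × Int) :=
  (if police = 0 ∧ medics = 0 then
    (PySem.List.pyRange 0 obs_rows 1).foldl (fun st i =>
      (PySem.List.pyRange 0 obs_cols 1).foldl (fun st j =>
        (PySem.List.pyRange 0 obs_num 1).foldl (fun st t =>
          (pvDIns (pvDIns (pvDIns st.1 ((i,j),t,"H") st.2) ((i,j),t,"S") (st.2+1)) ((i,j),t,"U") (st.2+2),
           st.2+3)) st) st) ([], 1)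
  else if medics = 0 then
    (PySem.List.pyRange 0 obs_rows 1).foldl (fun st i =>
      (PySem.List.pyRange 0 obs_cols 1).foldl (fun st j =>
        (PySem.List.pyRange 0 obs_num 1).foldl (fun st t =>
          (pvDIns (pvDIns (pvDIns (pvDIns st.1 ((i,j),t,"H") st.2) ((i,j),t,"S") (st.2+1)) ((i,j),t,"U") (st.2+2)) ((i,j),t,"Q") (st.2+3),
           st.2+4)) st) st) ([], 1)
  else if police = 0 then
    (PySem.List.pyRange 0 obs_rows 1).foldl (fun st i =>
      (PySem.List.pyRange 0 obs_cols 1).foldl (fun st j =>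
        (PySem.List.pyRange 0 obs_num 1).foldl (fun st t =>
          (pvDIns (pvDIns (pvDIns (pvDIns st.1 ((i,j),t,"H") st.2) ((i,j),t,"S") (st.2+1)) ((i,j),t,"U") (st.2+2)) ((i,j),t,"I") (st.2+3),
           st.2+4)) st) st) ([], 1)
  else
    (PySem.List.pyRange 0 obs_rows 1).foldl (fun st i =>
      (PySem.List.pyRange 0 obs_cols 1).foldl (fun st j =>
        (PySem.List.pyRange 0 obs_num 1).foldl (fun st t =>
          (pvDIns (pvDIns (pvDIns (pvDIns (pvDIns st.1 ((i,j),t,"H") st.2) ((i,j),t,"S") (st.2+1)) ((i,j),t,"U") (st.2+2)) ((i,j),t,"I") (st.2+3)) ((i,j),t,"Q") (st.2+4),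
           st.2+5)) st) st) ([], 1)).1

-- ===== PORT B =====
def initiate_dict_alt (medics : Int) (police : Int) (obs_num : Int) (obs_rows : Int) (obs_cols : Int) : List ((Int × Int) × Int × String × Int) :=
  let states : List String :=
    ["H", "S", "U"] ++ (if medics ≠ 0 then ["I"] else []) ++ (if police ≠ 0 then ["Q"] else [])
  if obs_rows ≤ 0 ∨ obs_cols ≤ 0 ∨ obs_num ≤ 0 then []
  else
    let S : Int := (states.length : Int)
    (PySem.List.pyRange 0 (obs_rows * obs_cols * obs_num * S) 1).foldl (fun d n =>
      let k := PySem.Int.mod n S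
      let rest := PySem.Int.floordiv n S
      let t := PySem.Int.mod rest obs_num
      let rest2 := PySem.Int.floordiv rest obs_num
      let j := PySem.Int.mod rest2 obs_cols
      let i := PySem.Int.floordiv rest2 obs_cols
      -- states[k]: k is always in range (0 ≤ k < S); the "" default only makes the lookup total
      pvDIns d ((i, j), t, PySem.List.pyGetD states k "") (n + 1)) []

-- ===== PRECONDITION & SPEC =====
def Spec_initiate_dict (medics : Int) (police : Int) (obs_num : Int) (obs_rows : Int) (obs_cols : Int) (out : List ((Int × Int) × Int × String × Int)) : Prop := out = initiate_dict_alt medics police obs_num obs_rows obs_cols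
instance (medics : Int) (police : Int) (obs_num : Int) (obs_rows : Int) (obs_cols : Int) (out : List ((Int × Int) × Int × String × Int)) : Decidable (Spec_initiate_dict medics police obs_num obs_rows obs_cols out) := by unfold Spec_initiate_dict; infer_instance

-- ===== CLAIM =====
def Claim_equal_initiate_dict : Prop := ∀ (medics : Int) (police : Int) (obs_num : Int) (obs_rows : Int) (obs_cols : Int), Dom_initiate_dict medics police obs_num obs_rows obs_cols → Spec_initiate_dict medics police obs_num obs_rows obs_cols (initiate_dict medics police obs_num obs_rows obs_cols)

-- ===== LEMMAS AND PROOFS =====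

theorem pvDIns_fresh (d : List ((Int × Int) × Int × String × Int)) (k : (Int × Int) × Int × String) (v : Int)
    (h : ∀ e ∈ d, (e.1, e.2.1, e.2.2.1) ≠ k) :
    pvDIns d k v = d ++ [(k.1, k.2.1, k.2.2, v)] := by
  induction d with
  | nil => rfl
  | cons e rest ih =>
      simp only [pvDIns, h e (List.mem_cons_self), if_false, List.cons_append, List.cons.injEq, true_and]
      exact ih (fun e' he' => h e' (List.mem_cons_of_mem _ he'))

theorem pvEnumFold (i j t idx : Int) :
    ∀ (ss : List String) (m : Nat) (d : List ((Int × Int) × Int × String × Int)),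
    ss.Nodup → (∀ e ∈ d, ∀ s ∈ ss, (e.1, e.2.1, e.2.2.1) ≠ ((i,j),t,s)) →
    (PySem.List.enumerate ss (m : Int)).foldl (fun d ks => pvDIns d ((i,j),t,ks.2) (idx + ks.1)) d
    = d ++ (List.range ss.length).map (fun k => ((i,j), t, ss.getD k "", idx + ((m + k : Nat) : Int))) := by
  intro ss
  induction ss with
  | nil => intro m d _ _; simp [PySem.List.enumerate_nil]
  | cons s tl ih =>
      intro m d hnd hfresh
      rw [PySem.List.enumerate_cons]
      simp only [List.foldl_cons]
      rw [pvDIns_fresh _ _ _ (fun e he => hfresh e he s (List.mem_cons_self))]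
      have : ((m : Int) + 1) = ((m + 1 : Nat) : Int) := by push_cast; ring
      rw [this, ih (m+1) _ (List.nodup_cons.mp hnd).2 ?fresh]
      case fresh =>
        intro e he s' hs'
        rcases List.mem_append.mp he with he | he
        · exact hfresh e he s' (List.mem_cons_of_mem _ hs')
        · simp only [List.mem_singleton] at he
          subst he
          simp only [ne_eq, Prod.mk.injEq, true_and]
          intro hss
          exact (List.nodup_cons.mp hnd).1 (hss ▸ hs')
      rw [List.append_assoc]
      congr 1
      rw [List.length_cons, List.range_succ_eq_map, List.map_cons, List.map_map]
      simp only [List.getD_cons_zero, Nat.add_zero, List.singleton_append]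
      refine congrArg (_ :: ·) (List.map_congr_left fun k _ => ?_)
      simp only [Function.comp_apply, List.getD_cons_succ]
      have : m + 1 + k = m + k.succ := by omega
      rw [this]

def pvBody (states : List String) (st : List ((Int × Int) × Int × String × Int) × Int) (i j t : Int) :
    List ((Int × Int) × Int × String × Int) × Int :=
  ((PySem.List.enumerate states 0).foldl (fun d ks => pvDIns d ((i,j),t,ks.2) (st.2 + ks.1)) st.1,
   st.2 + (states.length : Int))

def pvL0 (i j t idx : Int) (states : List String) : List ((Int × Int) × Int × String × Int) :=
  (List.range states.length).map (fun k => ((i,j), t, states.getD k "", idx + (k : Int)))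

theorem mem_pvL0 {e : (Int × Int) × Int × String × Int} {i j t idx : Int} {states : List String}
    (h : e ∈ pvL0 i j t idx states) : e.1 = (i, j) ∧ e.2.1 = t := by
  simp only [pvL0, List.mem_map, List.mem_range] at h
  obtain ⟨k, _, rfl⟩ := h; exact ⟨rfl, rfl⟩

theorem pvTLoop (states : List String) (hnd : states.Nodup) (i j : Int) (n : Nat) (d : List ((Int × Int) × Int × String × Int)) (idx : Int)
    (h : ∀ e ∈ d, e.1 ≠ (i, j)) :
    (List.range n).foldl (fun st (t : Nat) => pvBody states st i j (t : Int)) (d, idx)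
    = (d ++ (List.range n).flatMap (fun (t : Nat) => pvL0 i j (t : Int) (idx + (t : Int) * (states.length : Int)) states),
       idx + (n : Int) * (states.length : Int)) := by
  induction n with
  | zero => simp
  | succ n ihn =>
      rw [List.range_succ, List.foldl_append, ihn, List.foldl_cons, List.foldl_nil]
      unfold pvBody
      have hfresh : ∀ e ∈ d ++ (List.range n).flatMap (fun (t : Nat) => pvL0 i j (t : Int) (idx + (t : Int) * (states.length : Int)) states),
          ∀ s ∈ states, (e.1, e.2.1, e.2.2.1) ≠ ((i,j),(n : Int),s) := by
        intro e he s hs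
        rcases List.mem_append.mp he with he | he
        · simp only [ne_eq, Prod.mk.injEq]
          intro hk
          exact h e he hk.1
        · simp only [List.mem_flatMap, List.mem_range] at he
          obtain ⟨t, ht, hmem⟩ := he
          obtain ⟨-, h2⟩ := mem_pvL0 hmem
          simp only [ne_eq, Prod.mk.injEq]
          intro hk
          rw [h2] at hk
          have : (t : Int) = n := hk.2.1
          omega
      dsimp only
      have hef := pvEnumFold i j (n : Int) (idx + (n : Int) * (states.length : Int)) states 0 _ hnd hfresh
      norm_num at hef
      rw [hef]
      rw [List.flatMap_append]
      simp only [List.flatMap_cons, List.flatMap_nil, List.append_nil]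
      refine Prod.ext ?_ ?_
      · simp [pvL0, List.getD]
      · push_cast; ring

def pvL1 (i j idx : Int) (num : Nat) (states : List String) : List ((Int × Int) × Int × String × Int) :=
  (List.range num).flatMap (fun (t : Nat) => pvL0 i j (t : Int) (idx + (t : Int) * (states.length : Int)) states)

def pvL2 (i idx : Int) (cols num : Nat) (states : List String) : List ((Int × Int) × Int × String × Int) :=
  (List.range cols).flatMap (fun (j : Nat) => pvL1 i (j : Int) (idx + (j : Int) * (num : Int) * (states.length : Int)) num states)

def pvL3 (idx : Int) (rows cols num : Nat) (states : List String) : List ((Int × Int) × Int × String × Int) :=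
  (List.range rows).flatMap (fun (i : Nat) => pvL2 (i : Int) (idx + (i : Int) * (cols : Int) * (num : Int) * (states.length : Int)) cols num states)

theorem mem_pvL1 {e : (Int × Int) × Int × String × Int} {i j idx : Int} {num : Nat} {states : List String}
    (h : e ∈ pvL1 i j idx num states) : e.1 = (i, j) := by
  simp only [pvL1, List.mem_flatMap] at h
  obtain ⟨t, _, ht⟩ := h; exact (mem_pvL0 ht).1

theorem mem_pvL2 {e : (Int × Int) × Int × String × Int} {i idx : Int} {cols num : Nat} {states : List String}
    (h : e ∈ pvL2 i idx cols num states) : e.1.1 = i := by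
  simp only [pvL2, List.mem_flatMap] at h
  obtain ⟨j, _, hj⟩ := h; rw [mem_pvL1 hj]

theorem pvJLoop (states : List String) (hnd : states.Nodup) (i : Int) (cn num : Nat) (d : List ((Int × Int) × Int × String × Int)) (idx : Int)
    (h : ∀ e ∈ d, e.1.1 ≠ i) :
    (List.range cn).foldl (fun st (j : Nat) =>
      (List.range num).foldl (fun st (t : Nat) => pvBody states st i (j : Int) (t : Int)) st) (d, idx)
    = (d ++ (List.range cn).flatMap (fun (j : Nat) => pvL1 i (j : Int) (idx + (j : Int) * (num : Int) * (states.length : Int)) num states),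
       idx + (cn : Int) * (num : Int) * (states.length : Int)) := by
  induction cn with
  | zero => simp
  | succ cn ihc =>
      rw [List.range_succ, List.foldl_append, ihc, List.foldl_cons, List.foldl_nil]
      have hfr : ∀ e ∈ d ++ (List.range cn).flatMap (fun (j : Nat) => pvL1 i (j : Int) (idx + (j : Int) * (num : Int) * (states.length : Int)) num states),
          e.1 ≠ (i, (cn : Int)) := by
        intro e he
        rcases List.mem_append.mp he with he | he
        · intro hk; exact h e he (by rw [hk])
        · simp only [List.mem_flatMap, List.mem_range] at he
          obtain ⟨j, hj, hmem⟩ := he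
          rw [mem_pvL1 hmem]
          intro hk
          have : (j : Int) = cn := (Prod.mk.injEq _ _ _ _ ▸ hk).2
          omega
      rw [pvTLoop states hnd i (cn : Int) num _ _ hfr]
      rw [List.flatMap_append]
      simp only [List.flatMap_cons, List.flatMap_nil, List.append_nil, List.append_assoc]
      refine Prod.ext ?_ ?_
      · rfl
      · push_cast; ring

theorem pvRLoop (states : List String) (hnd : states.Nodup) (rn cn nn : Nat) :
    (List.range rn).foldl (fun st (i : Nat) =>
      (List.range cn).foldl (fun st (j : Nat) =>
        (List.range nn).foldl (fun st (t : Nat) => pvBody states st (i : Int) (j : Int) (t : Int)) st) st) ([], 1)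
    = (pvL3 1 rn cn nn states, 1 + (rn : Int) * (cn : Int) * (nn : Int) * (states.length : Int)) := by
  induction rn with
  | zero => simp [pvL3]
  | succ rn ihr =>
      rw [List.range_succ, List.foldl_append, ihr, List.foldl_cons, List.foldl_nil]
      have hfr : ∀ e ∈ pvL3 1 rn cn nn states, e.1.1 ≠ (rn : Int) := by
        intro e he
        simp only [pvL3, List.mem_flatMap, List.mem_range] at he
        obtain ⟨i, hi, hmem⟩ := he
        rw [mem_pvL2 hmem]
        intro hk
        omega
      rw [pvJLoop states hnd (rn : Int) cn nn _ _ hfr]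
      simp only [pvL3, List.range_succ, List.flatMap_append, List.flatMap_cons, List.flatMap_nil, List.append_nil]
      refine Prod.ext ?_ ?_
      · simp only [pvL2]
      · push_cast; ring

theorem pvConv (states : List String) (hnd : states.Nodup) (rows cols num : Int)
    (f : (List ((Int × Int) × Int × String × Int) × Int) → Int → Int → Int → (List ((Int × Int) × Int × String × Int) × Int))
    (hf : ∀ st i j t, f st i j t = pvBody states st i j t) :
    ((PySem.List.pyRange 0 rows 1).foldl (fun st i =>
      (PySem.List.pyRange 0 cols 1).foldl (fun st j =>
        (PySem.List.pyRange 0 num 1).foldl (fun st t => f st i j t) st) st) ([], 1)).1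
    = pvL3 1 rows.toNat cols.toNat num.toNat states := by
  have hfe : f = fun st i j t => pvBody states st i j t :=
    funext fun st => funext fun i => funext fun j => funext fun t => hf st i j t
  subst hfe
  rw [PySem.List.pyRange_one 0 rows, PySem.List.pyRange_one 0 cols, PySem.List.pyRange_one 0 num]
  simp only [zero_add, Int.sub_zero, List.foldl_map]
  rw [pvRLoop states hnd rows.toNat cols.toNat num.toNat]

theorem pvA_eq (medics police obs_num obs_rows obs_cols : Int) :
    initiate_dict medics police obs_num obs_rows obs_cols
    = pvL3 1 obs_rows.toNat obs_cols.toNat obs_num.toNat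
        (["H", "S", "U"] ++ (if medics ≠ 0 then ["I"] else []) ++ (if police ≠ 0 then ["Q"] else [])) := by
  unfold initiate_dict
  by_cases hp : police = 0 <;> by_cases hm : medics = 0 <;>
    simp only [hp, hm, ne_eq, not_true_eq_false, not_false_eq_true, if_true, if_false,
      and_self, and_true, and_false, List.append_nil, List.nil_append, List.cons_append] <;>
    exact pvConv _ (by decide) obs_rows obs_cols obs_num _ (fun st i j t => by
      simp [pvBody, PySem.List.enumerate_cons, PySem.List.enumerate_nil])

theorem pvBFold (key : Nat → (Int × Int) × Int × String) (hinj : ∀ m n : Nat, key m = key n → m = n) :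
    ∀ T : Nat,
    (List.range T).foldl (fun d (n : Nat) => pvDIns d (key n) ((n : Int) + 1)) []
    = (List.range T).map (fun (n : Nat) => ((key n).1, (key n).2.1, (key n).2.2, ((n : Int) + 1))) := by
  intro T
  induction T with
  | zero => rfl
  | succ T ih =>
      rw [List.range_succ, List.foldl_append, ih, List.foldl_cons, List.foldl_nil]
      rw [pvDIns_fresh]
      · rw [List.map_append]; rfl
      · intro e he
        simp only [List.mem_map, List.mem_range] at he
        obtain ⟨m, hm, rfl⟩ := he
        simp only [ne_eq]
        intro hk
        have : m = T := hinj m T hk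
        omega

theorem pvRangeMul (b : Nat) {α : Type} (f : Nat → α) :
    ∀ a : Nat, (List.range (a * b)).map f
    = (List.range a).flatMap (fun q => (List.range b).map (fun r => f (q * b + r))) := by
  intro a
  induction a with
  | zero => simp
  | succ a ih =>
      rw [Nat.succ_mul, List.range_add, List.map_append, ih, List.range_succ, List.flatMap_append]
      simp only [List.flatMap_cons, List.flatMap_nil, List.append_nil, List.map_map]
      refine congrArg (_ ++ ·) (List.map_congr_left fun r _ => ?_)
      simp [Nat.add_comm]

-- the decode key of B's flat loop

def pvKeyN (states : List String) (N C : Nat) (n : Nat) : (Int × Int) × Int × String :=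
  ((((n / states.length / N / C : Nat) : Int), ((n / states.length / N % C : Nat) : Int)),
   ((n / states.length % N : Nat) : Int), states.getD (n % states.length) "")

-- it is injective: the flat index is reconstructible from its digits

theorem pvKeyInj (states : List String) (hS : 0 < states.length) (hnd : states.Nodup) (N C : Nat)
    (m n : Nat) (h : pvKeyN states N C m = pvKeyN states N C n) : m = n := by
  unfold pvKeyN at h
  simp only [Prod.mk.injEq, Nat.cast_inj] at h
  obtain ⟨⟨hi, hj⟩, ht, hs⟩ := h
  have hk : m % states.length = n % states.length := by
    have hmlt : m % states.length < states.length := Nat.mod_lt _ hS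
    have hnlt : n % states.length < states.length := Nat.mod_lt _ hS
    rw [List.getD_eq_getElem states "" hmlt, List.getD_eq_getElem states "" hnlt] at hs
    exact (List.Nodup.getElem_inj_iff hnd).mp hs
  have e1 : m / states.length / N = n / states.length / N := by
    rw [← Nat.div_add_mod (m / states.length / N) C, hi, hj, Nat.div_add_mod]
  have e2 : m / states.length = n / states.length := by
    rw [← Nat.div_add_mod (m / states.length) N, e1, ht, Nat.div_add_mod]
  rw [← Nat.div_add_mod m states.length, e2, hk, Nat.div_add_mod]

theorem pvMapEq (states : List String) (R C N : Nat) (hS : 0 < states.length) :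
    (List.range (R * C * N * states.length)).map (fun (n : Nat) =>
      ((pvKeyN states N C n).1, (pvKeyN states N C n).2.1, (pvKeyN states N C n).2.2, ((n : Int) + 1)))
    = pvL3 1 R C N states := by
  have h1 : R * C * N * states.length = R * (C * (N * states.length)) := by ring
  rw [h1, pvRangeMul]
  unfold pvL3
  refine List.flatMap_congr fun i hi => ?_
  rw [pvRangeMul]
  unfold pvL2
  refine List.flatMap_congr fun j hj => ?_
  rw [pvRangeMul]
  unfold pvL1
  refine List.flatMap_congr fun t ht => ?_
  unfold pvL0
  refine List.map_congr_left fun k hk => ?_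
  rw [List.mem_range] at hk ht hj
  have hn : i * (C * (N * states.length)) + (j * (N * states.length) + (t * states.length + k))
      = ((i * C + j) * N + t) * states.length + k := by ring
  rw [hn]
  unfold pvKeyN
  have e1 : (((i * C + j) * N + t) * states.length + k) % states.length = k := by
    rw [mul_comm ((i * C + j) * N + t) states.length, Nat.mul_add_mod, Nat.mod_eq_of_lt hk]
  have e2 : (((i * C + j) * N + t) * states.length + k) / states.length = (i * C + j) * N + t := by
    rw [mul_comm ((i * C + j) * N + t) states.length, Nat.mul_add_div hS, Nat.div_eq_of_lt hk, add_zero]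
  have e3 : ((i * C + j) * N + t) / N = i * C + j := by
    rw [mul_comm (i * C + j) N, Nat.mul_add_div (by omega), Nat.div_eq_of_lt ht, add_zero]
  have e4 : ((i * C + j) * N + t) % N = t := by
    rw [mul_comm (i * C + j) N, Nat.mul_add_mod, Nat.mod_eq_of_lt ht]
  have e5 : (i * C + j) / C = i := by
    rw [mul_comm i C, Nat.mul_add_div (by omega), Nat.div_eq_of_lt hj, add_zero]
  have e6 : (i * C + j) % C = j := by
    rw [mul_comm i C, Nat.mul_add_mod, Nat.mod_eq_of_lt hj]
  simp only [e1, e2, e3, e4, e5, e6]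
  refine Prod.ext rfl (Prod.ext rfl (Prod.ext rfl ?_))
  push_cast; ring

theorem pvB_eq (medics police obs_num obs_rows obs_cols : Int)
    (hr : 0 < obs_rows) (hc : 0 < obs_cols) (hn : 0 < obs_num) :
    initiate_dict_alt medics police obs_num obs_rows obs_cols
    = pvL3 1 obs_rows.toNat obs_cols.toNat obs_num.toNat
        (["H", "S", "U"] ++ (if medics ≠ 0 then ["I"] else []) ++ (if police ≠ 0 then ["Q"] else [])) := by
  set states : List String :=
    ["H", "S", "U"] ++ (if medics ≠ 0 then ["I"] else []) ++ (if police ≠ 0 then ["Q"] else []) with hstates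
  have hnd : states.Nodup := by
    rw [hstates]; by_cases hm : medics = 0 <;> by_cases hp : police = 0 <;> simp [hm, hp]
  have hS : 0 < states.length := by rw [hstates]; simp
  set R := obs_rows.toNat with hR
  set C := obs_cols.toNat with hC
  set N := obs_num.toNat with hN
  have hrr : obs_rows = (R : Int) := by omega
  have hcc : obs_cols = (C : Int) := by omega
  have hnn : obs_num = (N : Int) := by omega
  unfold initiate_dict_alt
  rw [if_neg (by omega)]
  dsimp only
  rw [← hstates, hrr, hcc, hnn]
  have htot : (R : Int) * (C : Int) * (N : Int) * ((states.length : Nat) : Int)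
      = ((R * C * N * states.length : Nat) : Int) := by push_cast; ring
  rw [htot, PySem.List.pyRange_one, Int.sub_zero, Int.toNat_natCast]
  rw [List.foldl_map]
  simp only [zero_add, PySem.Int.floordiv_natCast, PySem.Int.mod_natCast, PySem.List.pyGetD_natCast]
  exact (pvBFold (pvKeyN states N C) (pvKeyInj states hS hnd N C) (R * C * N * states.length)).trans
    (pvMapEq states R C N hS)

-- ===== VERDICT =====
theorem initiate_dict_spec : Claim_equal_initiate_dict := by
  intro medics police obs_num obs_rows obs_cols _
  unfold Spec_initiate_dict
  by_cases hr : 0 < obs_rows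
  case neg =>
    rw [pvA_eq]
    simp [initiate_dict_alt, pvL3, show obs_rows ≤ 0 by omega, show obs_rows.toNat = 0 by omega]
  case pos =>
  by_cases hc : 0 < obs_cols
  case neg =>
    rw [pvA_eq]
    simp [initiate_dict_alt, pvL3, pvL2, show obs_cols ≤ 0 by omega, show obs_cols.toNat = 0 by omega]
  case pos =>
  by_cases hn : 0 < obs_num
  case neg =>
    rw [pvA_eq]
    simp [initiate_dict_alt, pvL3, pvL2, pvL1, show obs_num ≤ 0 by omega, show obs_num.toNat = 0 by omega]
  case pos =>
  rw [pvA_eq, pvB_eq medics police obs_num obs_rows obs_cols hr hc hn]
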